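-- pv_equiv track=rewrite | github.com/zahias/advising | backend/app/services/insights_service.py | _group_semesters_by_year
-- ===== SOURCE A (Python) =====
-- from typing import Any, Iterable
--
-- def _group_semesters_by_year(semesters: dict[str, list[dict[str, Any]]]) -> dict[str, list[str]]:
--     year_groups: dict[str, list[str]] = {}
--     semester_order = {'fall': 0, 'spring': 1, 'summer': 2}
--     for semester_key in semesters.keys():
--         if '-' not in semester_key:
--             continue
--         _, year_num = semester_key.split('-', 1)
--         year_name = f'Year {year_num.strip()}'
--         year_groups.setdefault(year_name, []).append(semester_key)
--     for year_name in year_groups: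
--         year_groups[year_name].sort(key=lambda item: semester_order.get(item.split('-')[0].lower(), 99))
--     return year_groups
-- ===== SOURCE B (Python) =====
-- def _group_semesters_by_year(semesters):
--     # Bucket (counting) grouping: no comparison sort; one pass fills per-(year, rank) cells,
--     # then each year's list is the concatenation of its four rank cells.
--     semester_order = {'fall': 0, 'spring': 1, 'summer': 2}
--     cells = {}
--     years_seen = []
--     for semester_key in semesters:
--         if '-' not in semester_key:
--             continue
--         _, year_num = semester_key.split('-', 1)
--         year_name = f'Year {year_num.strip()}'
--         rank = semester_order.get(semester_key.split('-')[0].lower(), 99)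
--         cells.setdefault((year_name, rank), []).append(semester_key)
--         years_seen.append(year_name)
--     return {
--         y: cells.get((y, 0), []) + cells.get((y, 1), []) + cells.get((y, 2), []) + cells.get((y, 99), [])
--         for y in dict.fromkeys(years_seen)
--     }
-- ===== Notes on version B (the rewrite author's own statement) =====
-- stated objective: alternative
-- what changed: Replaces the per-year comparison sort (list.sort with a season key) by a bucket/counting grouping: one pass drops each valid key into a (year, season-rank) cell dict and each year's list is the concatenation of its four rank cells, so no sort is ever performed.
import Mathlib
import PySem

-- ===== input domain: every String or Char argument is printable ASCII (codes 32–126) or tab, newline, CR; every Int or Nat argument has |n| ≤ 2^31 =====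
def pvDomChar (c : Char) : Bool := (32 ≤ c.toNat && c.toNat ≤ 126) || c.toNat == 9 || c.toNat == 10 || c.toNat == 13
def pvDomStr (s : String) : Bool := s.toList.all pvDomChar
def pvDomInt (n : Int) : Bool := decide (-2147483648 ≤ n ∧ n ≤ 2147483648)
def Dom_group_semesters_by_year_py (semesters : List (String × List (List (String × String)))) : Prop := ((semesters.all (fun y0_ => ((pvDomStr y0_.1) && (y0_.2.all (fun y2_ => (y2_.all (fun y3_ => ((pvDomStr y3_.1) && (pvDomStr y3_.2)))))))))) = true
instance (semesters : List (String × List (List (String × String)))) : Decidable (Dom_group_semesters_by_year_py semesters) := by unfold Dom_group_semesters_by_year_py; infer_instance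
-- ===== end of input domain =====

-- B replaces A's per-year comparison sort by a one-pass bucket grouping into (year, season-rank)
-- cells; same return value, no sort performed ("alternative" objective, no speed claim).

-- shared helpers (both Pythons compute these exact sub-expressions)
-- semester_order = {'fall': 0, 'spring': 1, 'summer': 2}
def pvOrder : PySem.Dict String Int := PySem.Dict.ofList [("fall", 0), ("spring", 1), ("summer", 2)]
-- semester_order.get(key.split('-')[0].lower(), 99); split never returns [], so getD 0 "" is exact
def pvRank (k : String) : Int :=
  pvOrder.getD (PySem.Str.lower (((PySem.Str.split? k "-").getD []).getD 0 "")) 99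
-- f'Year {key.split("-", 1)[1].strip()}'; '-' in key guarantees the split has 2 parts, getD is exact
def pvYearName (k : String) : String :=
  "Year " ++ PySem.Str.strip (((PySem.Str.splitMax? k "-" 1).getD []).getD 1 "")

-- ===== PORT A =====
-- year_groups.setdefault(year_name, []).append(key)  ==  d[y] = d.get(y, []) + [key]  ==  Dict.modify;
-- the final in-place per-key .sort over the dict's keys is the value-wise map of the stable sort.
def group_semesters_by_year_py (semesters : List (String × List (List (String × String)))) : List (String × List String) :=
  let d := semesters.foldl
    (fun d p =>
      if PySem.Str.isIn "-" p.1 then d.modify (pvYearName p.1) [] (· ++ [p.1]) else d)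
    (PySem.Dict.empty : PySem.Dict String (List String))
  d.items.map (fun q => (q.1, PySem.List.sorted q.2 pvRank))

-- ===== PORT B =====
def group_semesters_by_year_py_alt (semesters : List (String × List (List (String × String)))) : List (String × List String) :=
  let st := semesters.foldl
    (fun st p =>
      if PySem.Str.isIn "-" p.1 then
        (st.1.modify (pvYearName p.1, pvRank p.1) [] (· ++ [p.1]), st.2 ++ [pvYearName p.1])
      else st)
    ((PySem.Dict.empty : PySem.Dict (String × Int) (List String)), ([] : List String))
  (PySem.List.dedup st.2).map (fun y =>
    (y, st.1.getD (y, 0) [] ++ st.1.getD (y, 1) [] ++ st.1.getD (y, 2) [] ++ st.1.getD (y, 99) []))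

-- ===== PRECONDITION & SPEC =====
def Spec_group_semesters_by_year_py (semesters : List (String × List (List (String × String)))) (out : List (String × List String)) : Prop := out = group_semesters_by_year_py_alt semesters
instance (semesters : List (String × List (List (String × String)))) (out : List (String × List String)) : Decidable (Spec_group_semesters_by_year_py semesters out) := by unfold Spec_group_semesters_by_year_py; infer_instance

-- ===== CLAIM (what is proved, stated in full; the proofs are below) =====
def Claim_equal_group_semesters_by_year_py : Prop := ∀ (semesters : List (String × List (List (String × String)))), Dom_group_semesters_by_year_py semesters → Spec_group_semesters_by_year_py semesters (group_semesters_by_year_py semesters)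

-- ===== LEMMAS AND PROOFS =====

-- the valid keys (those containing '-'), in order
def pvValid (semesters : List (String × List (List (String × String)))) : List String :=
  ((semesters.map (·.1)).filter (fun k => PySem.Str.isIn "-" k))

-- pvRank only takes the values 0, 1, 2, 99
lemma pvRank_cases (k : String) : pvRank k = 0 ∨ pvRank k = 1 ∨ pvRank k = 2 ∨ pvRank k = 99 := by
  have hord : pvOrder = PySem.Dict.mk [("fall", 0), ("spring", 1), ("summer", 2)] := by decide
  unfold pvRank
  rw [hord]
  set s := PySem.Str.lower (((PySem.Str.split? k "-").getD []).getD 0 "") with hs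
  rw [PySem.Dict.getD_eq_get?_getD]
  rw [PySem.Dict.get?_mk_cons, PySem.Dict.get?_mk_cons, PySem.Dict.get?_mk_cons]
  split_ifs <;> simp [PySem.Dict.get?]

-- a fold of key-wise list appends: the keys are the ordered-set update by the fold's keys
lemma keys_foldl_modify {κ β : Type} [BEq κ] [LawfulBEq κ] (l : List (κ × β)) (d : PySem.Dict κ (List β)) :
    (l.foldl (fun d p => d.modify p.1 [] (· ++ [p.2])) d).keys
      = PySem.Set.update d.keys (l.map (·.1)) := by
  induction l generalizing d with
  | nil => simp [PySem.Set.update]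
  | cons p t ih =>
    simp only [List.foldl_cons, List.map_cons]
    rw [ih, PySem.Set.update_cons]
    congr 1
    rw [PySem.Dict.keys_modify]
    by_cases h : d.contains p.1 = true
    · rw [PySem.Dict.keys_insert_of_contains _ _ h]
      simp [PySem.Set.add, PySem.Set.contains, ← PySem.Dict.contains_iff_mem_keys, h]
    · have h' : d.contains p.1 = false := by simpa using h
      rw [PySem.Dict.keys_insert_of_not_contains _ _ h']
      simp [PySem.Set.add, PySem.Set.contains, ← PySem.Dict.contains_iff_mem_keys, h']

-- items of a dict with nodup keys, as a map over its keys
lemma items_eq_map_keys {κ β : Type} [BEq κ] [LawfulBEq κ] (d : PySem.Dict κ (List β))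
    (h : d.keys.Nodup) : d.items = d.keys.map (fun k => (k, d.getD k [])) := by
  have hk : d.keys = d.items.map (·.1) := by simp only [PySem.Dict.keys]
  apply List.ext_getElem
  · simp [hk]
  · intro i hi hj
    have hmem : d.items[i] ∈ d.items := List.getElem_mem _
    have hpair : (d.items[i].1, d.items[i].2) ∈ d.items := by simp
    have hget : d.get? d.items[i].1 = some d.items[i].2 :=
      PySem.Dict.get?_of_mem_items d hpair h
    have hlen : i < d.keys.length := by simp [hk]; simpa using hi
    have : d.keys[i] = d.items[i].1 := by simp [hk]
    simp [this, PySem.Dict.getD_of_get?_eq_some _ _ hget]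

-- a pair fold whose components do not interact splits
lemma foldl_pair_split {α A B : Type} (l : List α) (c : α → Bool) (F : A → α → A) (G : B → α → B)
    (a : A) (b : B) :
    l.foldl (fun st p => if c p then (F st.1 p, G st.2 p) else st) (a, b)
      = (l.foldl (fun d p => if c p then F d p else d) a,
         l.foldl (fun s p => if c p then G s p else s) b) := by
  induction l generalizing a b with
  | nil => rfl
  | cons p t ih =>
    simp only [List.foldl_cons]
    by_cases h : c p = true <;> simp [h, ih]

-- insertBy skips a prefix it is not 'before'
lemma insertBy_append_left {α : Type} (before : α → α → Bool) (x : α) (ys zs : List α)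
    (h : ∀ y ∈ ys, before x y = false) :
    PySem.List.insertBy before x (ys ++ zs) = ys ++ PySem.List.insertBy before x zs := by
  induction ys with
  | nil => simp
  | cons y t ih =>
    have hy := h y (by simp)
    simp [PySem.List.insertBy, hy, ih (fun a ha => h a (by simp [ha]))]

-- insertBy goes to the front of a list it is everywhere 'before'
lemma insertBy_all_before {α : Type} (before : α → α → Bool) (x : α) (zs : List α)
    (h : ∀ y ∈ zs, before x y = true) :
    PySem.List.insertBy before x zs = x :: zs := by
  cases zs with
  | nil => simp [PySem.List.insertBy]
  | cons z t => simp [PySem.List.insertBy, h z (by simp)]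

-- the stable sort by pvRank is the concatenation of the four rank buckets
lemma sorted_eq_buckets (m : List String) :
    PySem.List.sorted m pvRank
      = m.filter (fun k => pvRank k == 0) ++ m.filter (fun k => pvRank k == 1)
        ++ m.filter (fun k => pvRank k == 2) ++ m.filter (fun k => pvRank k == 99) := by
  induction m using List.reverseRecOn with
  | nil => simp [PySem.List.sorted_eq_foldl_insertBy]
  | append_singleton m x ih =>
    have hstep : PySem.List.sorted (m ++ [x]) pvRank
        = PySem.List.insertBy (fun a b => decide (pvRank a < pvRank b)) x (PySem.List.sorted m pvRank) := by
      rw [PySem.List.sorted_eq_foldl_insertBy, PySem.List.sorted_eq_foldl_insertBy, List.foldl_append]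
      rfl
    rw [hstep, ih]
    simp only [List.filter_append, List.filter_singleton]
    set bef := fun a b => decide (pvRank a < pvRank b) with hbef
    set f0 := m.filter (fun k => pvRank k == 0)
    set f1 := m.filter (fun k => pvRank k == 1)
    set f2 := m.filter (fun k => pvRank k == 2)
    set f99 := m.filter (fun k => pvRank k == 99)
    have m0 : ∀ y ∈ f0, pvRank y = 0 := fun y hy => by simpa using List.of_mem_filter hy
    have m1 : ∀ y ∈ f1, pvRank y = 1 := fun y hy => by simpa using List.of_mem_filter hy
    have m2 : ∀ y ∈ f2, pvRank y = 2 := fun y hy => by simpa using List.of_mem_filter hy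
    have m99 : ∀ y ∈ f99, pvRank y = 99 := fun y hy => by simpa using List.of_mem_filter hy
    rcases pvRank_cases x with hx | hx | hx | hx
    · have e1 : f0 ++ f1 ++ f2 ++ f99 = f0 ++ (f1 ++ f2 ++ f99) := by simp
      rw [e1, insertBy_append_left bef x f0 _
            (fun y hy => by simp [hbef, m0 y hy, hx]),
          insertBy_all_before bef x _
            (fun y hy => by
              rcases List.mem_append.1 hy with hy' | hy'
              · rcases List.mem_append.1 hy' with h2 | h2
                · simp [hbef, m1 y h2, hx]
                · simp [hbef, m2 y h2, hx]
              · simp [hbef, m99 y hy', hx])]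
      simp [hx]
    · have e1 : f0 ++ f1 ++ f2 ++ f99 = (f0 ++ f1) ++ (f2 ++ f99) := by simp
      rw [e1, insertBy_append_left bef x (f0 ++ f1) _
            (fun y hy => by
              rcases List.mem_append.1 hy with h2 | h2
              · simp [hbef, m0 y h2, hx]
              · simp [hbef, m1 y h2, hx]),
          insertBy_all_before bef x _
            (fun y hy => by
              rcases List.mem_append.1 hy with h2 | h2
              · simp [hbef, m2 y h2, hx]
              · simp [hbef, m99 y h2, hx])]
      simp [hx]
    · have e1 : f0 ++ f1 ++ f2 ++ f99 = (f0 ++ f1 ++ f2) ++ f99 := by simp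
      rw [e1, insertBy_append_left bef x (f0 ++ f1 ++ f2) _
            (fun y hy => by
              rcases List.mem_append.1 hy with h2 | h2
              · rcases List.mem_append.1 h2 with h3 | h3
                · simp [hbef, m0 y h3, hx]
                · simp [hbef, m1 y h3, hx]
              · simp [hbef, m2 y h2, hx]),
          insertBy_all_before bef x f99 (fun y hy => by simp [hbef, m99 y hy, hx])]
      simp [hx]
    · rw [PySem.List.insertBy_of_forall_not_before bef x _
            (fun y hy => by
              rcases List.mem_append.1 hy with h2 | h2
              · rcases List.mem_append.1 h2 with h3 | h3
                · rcases List.mem_append.1 h3 with h4 | h4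
                  · simp [hbef, m0 y h4, hx]
                  · simp [hbef, m1 y h4, hx]
                · simp [hbef, m2 y h3, hx]
              · simp [hbef, m99 y h2, hx])]
      simp [hx]

-- A's fold, re-indexed as a modify-append fold over (year, key) pairs
lemma A_fold_eq (semesters : List (String × List (List (String × String)))) :
    semesters.foldl
      (fun d p => if PySem.Str.isIn "-" p.1 then d.modify (pvYearName p.1) [] (· ++ [p.1]) else d)
      (PySem.Dict.empty : PySem.Dict String (List String))
      = ((pvValid semesters).map (fun k => (pvYearName k, k))).foldl
          (fun d p => d.modify p.1 [] (· ++ [p.2])) PySem.Dict.empty := by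
  rw [List.foldl_map, pvValid, List.foldl_filter, List.foldl_map]

-- B's cell fold, re-indexed likewise over ((year, rank), key) pairs
lemma B_fold_eq (semesters : List (String × List (List (String × String)))) :
    semesters.foldl
      (fun d p => if PySem.Str.isIn "-" p.1 then d.modify (pvYearName p.1, pvRank p.1) [] (· ++ [p.1]) else d)
      (PySem.Dict.empty : PySem.Dict (String × Int) (List String))
      = ((pvValid semesters).map (fun k => ((pvYearName k, pvRank k), k))).foldl
          (fun d p => d.modify p.1 [] (· ++ [p.2])) PySem.Dict.empty := by
  rw [List.foldl_map, pvValid, List.foldl_filter, List.foldl_map]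

-- the A-side dict's group for year y
lemma A_getD (semesters : List (String × List (List (String × String)))) (y : String) :
    (semesters.foldl
      (fun d p => if PySem.Str.isIn "-" p.1 then d.modify (pvYearName p.1) [] (· ++ [p.1]) else d)
      (PySem.Dict.empty : PySem.Dict String (List String))).getD y []
      = (pvValid semesters).filter (fun k => pvYearName k == y) := by
  rw [A_fold_eq, PySem.Dict.getD_foldl_modify_append]
  simp [List.filter_map, Function.comp_def]

-- the B-side cell for (y, r)
lemma B_getD (semesters : List (String × List (List (String × String)))) (y : String) (r : Int) :
    (semesters.foldl
      (fun d p => if PySem.Str.isIn "-" p.1 then d.modify (pvYearName p.1, pvRank p.1) [] (· ++ [p.1]) else d)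
      (PySem.Dict.empty : PySem.Dict (String × Int) (List String))).getD (y, r) []
      = ((pvValid semesters).filter (fun k => pvYearName k == y)).filter (fun k => pvRank k == r) := by
  rw [B_fold_eq, PySem.Dict.getD_foldl_modify_append]
  simp [List.filter_map, Function.comp_def, List.filter_filter]
  apply List.filter_congr
  intro k _
  show ((pvYearName k, pvRank k) == (y, r)) = _
  simp [BEq.beq, Bool.and_comm]

-- A's dict keys: the ordered set of year names of the valid keys
lemma A_keys (semesters : List (String × List (List (String × String)))) :
    (semesters.foldl
      (fun d p => if PySem.Str.isIn "-" p.1 then d.modify (pvYearName p.1) [] (· ++ [p.1]) else d)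
      (PySem.Dict.empty : PySem.Dict String (List String))).keys
      = PySem.Set.ofList ((pvValid semesters).map pvYearName) := by
  rw [A_fold_eq, keys_foldl_modify]
  simp [PySem.Set.update, PySem.Set.ofList_eq_foldl, List.foldl_map]

-- ===== VERDICT (by name: the statement is the Claim_ definition above) =====
theorem group_semesters_by_year_py_spec : Claim_equal_group_semesters_by_year_py := by
  intro semesters _
  unfold Spec_group_semesters_by_year_py
  unfold group_semesters_by_year_py group_semesters_by_year_py_alt
  show (semesters.foldl
        (fun d p => if PySem.Str.isIn "-" p.1 then d.modify (pvYearName p.1) [] (· ++ [p.1]) else d)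
        (PySem.Dict.empty : PySem.Dict String (List String))).items.map
          (fun q => (q.1, PySem.List.sorted q.2 pvRank))
      = (PySem.List.dedup (semesters.foldl
            (fun st p =>
              if PySem.Str.isIn "-" p.1 then
                (st.1.modify (pvYearName p.1, pvRank p.1) [] (· ++ [p.1]), st.2 ++ [pvYearName p.1])
              else st)
            ((PySem.Dict.empty : PySem.Dict (String × Int) (List String)), ([] : List String))).2).map
          (fun y => ((fun st => (y, st.1.getD (y, 0) [] ++ st.1.getD (y, 1) [] ++ st.1.getD (y, 2) [] ++ st.1.getD (y, 99) []))
            (semesters.foldl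
              (fun st p =>
                if PySem.Str.isIn "-" p.1 then
                  (st.1.modify (pvYearName p.1, pvRank p.1) [] (· ++ [p.1]), st.2 ++ [pvYearName p.1])
                else st)
              ((PySem.Dict.empty : PySem.Dict (String × Int) (List String)), ([] : List String)))))
  have hsplit : semesters.foldl
      (fun st p =>
        if PySem.Str.isIn "-" p.1 then
          (st.1.modify (pvYearName p.1, pvRank p.1) [] (· ++ [p.1]), st.2 ++ [pvYearName p.1])
        else st)
      ((PySem.Dict.empty : PySem.Dict (String × Int) (List String)), ([] : List String))
      = (semesters.foldl
          (fun d p => if PySem.Str.isIn "-" p.1 then d.modify (pvYearName p.1, pvRank p.1) [] (· ++ [p.1]) else d)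
          (PySem.Dict.empty : PySem.Dict (String × Int) (List String)),
         semesters.foldl
          (fun s p => if PySem.Str.isIn "-" p.1 then s ++ [pvYearName p.1] else s)
          ([] : List String)) :=
    foldl_pair_split semesters (fun p => PySem.Str.isIn "-" p.1)
      (fun d p => d.modify (pvYearName p.1, pvRank p.1) [] (· ++ [p.1]))
      (fun s p => s ++ [pvYearName p.1]) PySem.Dict.empty []
  rw [hsplit]
  simp only []
  have happ := PySem.List.foldl_append_if (fun (p : String × List (List (String × String))) => PySem.Str.isIn "-" p.1)
      (fun p => pvYearName p.1) semesters []
  rw [happ]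
  have hys : (semesters.filter (fun p => PySem.Str.isIn "-" p.1)).map (fun p => pvYearName p.1)
      = (pvValid semesters).map pvYearName := by
    simp [pvValid, List.filter_map, Function.comp_def]
  set d := semesters.foldl
      (fun d p => if PySem.Str.isIn "-" p.1 then d.modify (pvYearName p.1) [] (· ++ [p.1]) else d)
      (PySem.Dict.empty : PySem.Dict String (List String)) with hd
  have hnodup : d.keys.Nodup := by
    rw [hd, A_keys]; exact PySem.Set.nodup_ofList _
  rw [items_eq_map_keys d hnodup, List.map_map]
  rw [hd, A_keys]
  simp only [List.nil_append, hys, PySem.List.dedup_eq_ofList]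
  apply List.map_congr_left
  intro y _
  simp only [Function.comp_def]
  rw [A_getD, B_getD, B_getD, B_getD, B_getD, sorted_eq_buckets]
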